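-- pv_equiv track=rewrite | github.com/peterxxu/loan-recommendation | app.py | get_all_sub_regions_iterative
-- ===== SOURCE A (Python) =====
-- def get_all_sub_regions_iterative(region, hierarchy):
--     all_regions = {region}
--     queue = [region]
--     children_map = {}
--     for child, parent in hierarchy.items():
--         children_map.setdefault(parent, []).append(child)
--     while queue:
--         current_region = queue.pop(0)
--         direct_children = children_map.get(current_region, [])
--         for child in direct_children:
--             if child not in all_regions:
--                 all_regions.add(child)
--                 queue.append(child)
--     return all_regions
-- ===== SOURCE B (Python) =====
-- def get_all_sub_regions_iterative(region, hierarchy):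
--     order = [region]
--     i = 0
--     while i < len(order):
--         current = order[i]
--         for child, parent in hierarchy.items():
--             if parent == current and child not in order:
--                 order.append(child)
--         i += 1
--     return set(order)
-- ===== Notes on version B (the rewrite author's own statement) =====
-- stated objective: simpler
-- what changed: B drops A's prebuilt children_map, its visited set and its pop(0) queue: one growing list serves as both visited structure and worklist, an index cursor walks it, and children of the current node are found by rescanning hierarchy.items() directly.
import Mathlib
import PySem

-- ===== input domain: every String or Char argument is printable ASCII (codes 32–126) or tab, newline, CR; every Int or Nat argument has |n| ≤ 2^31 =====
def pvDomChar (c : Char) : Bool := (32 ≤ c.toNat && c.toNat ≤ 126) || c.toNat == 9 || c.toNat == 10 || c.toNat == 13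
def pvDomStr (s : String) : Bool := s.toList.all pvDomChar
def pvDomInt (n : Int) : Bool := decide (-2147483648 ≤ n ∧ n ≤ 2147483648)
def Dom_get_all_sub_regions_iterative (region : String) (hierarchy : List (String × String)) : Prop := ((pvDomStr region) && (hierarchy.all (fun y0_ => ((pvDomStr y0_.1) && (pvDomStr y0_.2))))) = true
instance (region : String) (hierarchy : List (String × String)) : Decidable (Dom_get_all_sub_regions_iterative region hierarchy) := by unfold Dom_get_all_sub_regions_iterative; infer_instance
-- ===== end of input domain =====

-- B replaces A's prebuilt children_map dict, its visited set and its pop(0) queue by ONE growing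
-- list walked by an index cursor (the list is both visited structure and worklist), finding
-- children by rescanning hierarchy.items() (objective: simpler; not faster).
-- Return value only; neither version mutates its arguments.

-- Shared marshalling helper (used by both ports): the 'hierarchy' parameter is a Python dict;
-- this models building that dict from the association list (insert overwrites in place:
-- duplicate keys keep their first position and last value) and taking its .items() list.
def gasrItems (hierarchy : List (String × String)) : List (String × String) :=
  (hierarchy.foldl (fun d cp => d.insert cp.1 cp.2) (PySem.Dict.empty : PySem.Dict String String)).items

-- 'n is the batch of elements a scan freshly appended after s, all drawn from univ'
def gasrOut (univ s n : List String) : Prop := n.Nodup ∧ ∀ x ∈ n, x ∉ s ∧ x ∈ univ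

-- counting fact used by both termination measures
theorem gasrCard {univ s n : List String} (h : gasrOut univ s n) :
    (univ.toFinset \ (s ++ n).toFinset).card + n.length = (univ.toFinset \ s.toFinset).card := by
  obtain ⟨hnd, hmem⟩ := h
  have hsub : n.toFinset ⊆ univ.toFinset \ s.toFinset := by
    intro x hx
    simp only [List.mem_toFinset, Finset.mem_sdiff] at *
    exact ⟨(hmem x hx).2, (hmem x hx).1⟩
  have h1 : (s ++ n).toFinset = s.toFinset ∪ n.toFinset := List.toFinset_append
  have h2 : univ.toFinset \ (s.toFinset ∪ n.toFinset) = (univ.toFinset \ s.toFinset) \ n.toFinset := by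
    ext x; simp; tauto
  have h3 : ((univ.toFinset \ s.toFinset) \ n.toFinset).card
      = (univ.toFinset \ s.toFinset).card - (n.toFinset ∩ (univ.toFinset \ s.toFinset)).card :=
    Finset.card_sdiff
  have h4 : n.toFinset ∩ (univ.toFinset \ s.toFinset) = n.toFinset := Finset.inter_eq_left.mpr hsub
  have h5 : n.toFinset.card = n.length := List.toFinset_card_of_nodup hnd
  have h6 : n.toFinset.card ≤ (univ.toFinset \ s.toFinset).card := Finset.card_le_card hsub
  rw [h1, h2, h3, h4]
  omega

-- ===== PORT A =====
-- inner loop: 'for child in direct_children: if child not in all_regions: all_regions.add(child); queue.append(child)'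
def gasrInnerA (acc : List String × List String) (cs : List String) : List String × List String :=
  cs.foldl (fun acc c =>
    if !PySem.Set.contains acc.1 c then (PySem.Set.add acc.1 c, acc.2 ++ [c]) else acc) acc

theorem gasrInnerA_spec (cs : List String) : ∀ s : List String,
    ∃ n, (∀ q, gasrInnerA (s, q) cs = (s ++ n, q ++ n)) ∧ gasrOut cs s n := by
  induction cs with
  | nil => exact fun s => ⟨[], by simp [gasrInnerA], by simp [gasrOut]⟩
  | cons c cs ih =>
    intro s
    by_cases hc : c ∈ s
    · obtain ⟨n, hfold, hnd, hmem⟩ := ih s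
      refine ⟨n, ?_, hnd, ?_⟩
      · intro q
        simpa [gasrInnerA, PySem.Set.contains_iff, hc] using hfold q
      · exact fun x hx => ⟨(hmem x hx).1, List.mem_cons_of_mem _ (hmem x hx).2⟩
    · obtain ⟨n, hfold, hnd, hmem⟩ := ih (s ++ [c])
      refine ⟨c :: n, ?_, ?_, ?_⟩
      · intro q
        have hstep : gasrInnerA (s, q) (c :: cs) = gasrInnerA (s ++ [c], q ++ [c]) cs := by
          simp [gasrInnerA, hc]
        rw [hstep, hfold]
        simp
      · refine List.Nodup.cons ?_ hnd
        intro hcn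
        exact (hmem c hcn).1 (by simp)
      · intro x hx
        rcases List.mem_cons.mp hx with rfl | hx'
        · exact ⟨hc, by simp⟩
        · refine ⟨fun hxs => (hmem x hx').1 (by simp [hxs]), List.mem_cons_of_mem _ (hmem x hx').2⟩

theorem gasrGetD_mem {cm : PySem.Dict String (List String)} {r x : String}
    (hx : x ∈ cm.getD r []) : x ∈ cm.values.flatten := by
  rw [PySem.Dict.getD_eq_get?_getD] at hx
  cases hg : cm.get? r with
  | none => rw [hg] at hx; simp at hx
  | some v =>
    rw [hg] at hx
    simp only [Option.getD_some] at hx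
    have hmem := PySem.Dict.mem_items_of_get?_eq_some _ hg
    have hv : v ∈ cm.values := by
      simp only [PySem.Dict.values]
      exact List.mem_map.mpr ⟨(r, v), hmem, rfl⟩
    exact List.mem_flatten.mpr ⟨v, hv, hx⟩

-- while-loop of A: pop(0), scan children_map.get(current, []), recurse
def gasrLoopA (cm : PySem.Dict String (List String)) (s q : List String) : List String :=
  match q with
  | [] => s
  | r :: rest =>
      let p := gasrInnerA (s, rest) (cm.getD r [])
      gasrLoopA cm p.1 p.2
termination_by 2 * (cm.values.flatten.toFinset \ s.toFinset).card + q.length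
decreasing_by
  obtain ⟨n, hfold, hnd, hmem⟩ := gasrInnerA_spec (cm.getD r []) s
  have hout : gasrOut cm.values.flatten s n :=
    ⟨hnd, fun x hx => ⟨(hmem x hx).1, gasrGetD_mem (hmem x hx).2⟩⟩
  have hcard := gasrCard hout
  simp only [hfold rest]
  simp only [List.length_append, List.length_cons]
  omega

def get_all_sub_regions_iterative (region : String) (hierarchy : List (String × String)) : List String :=
  let all_regions := PySem.Set.ofList [region]
  let queue := [region]
  let children_map :=
    (gasrItems hierarchy).foldl (fun d cp => d.modify cp.2 [] (fun l => l ++ [cp.1]))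
      (PySem.Dict.empty : PySem.Dict String (List String))
  gasrLoopA children_map all_regions queue

-- ===== PORT B =====
-- inner for-loop of B at cursor position i (current = order[i]):
-- 'for child, parent in hierarchy.items(): if parent == current and child not in order: order.append(child)'
def gasrScanC (items : List (String × String)) (cur : String) (ord : List String) : List String :=
  items.foldl (fun ord cp =>
    if cp.2 == cur && !ord.contains cp.1 then ord ++ [cp.1] else ord) ord

-- each scan appends a batch of fresh children drawn from items' keys (termination of the cursor loop)
theorem gasrScanC_spec (items : List (String × String)) (cur : String) : ∀ ord : List String,
    ∃ n, gasrScanC items cur ord = ord ++ n ∧ gasrOut (items.map Prod.fst) ord n := by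
  induction items with
  | nil => exact fun ord => ⟨[], by simp [gasrScanC], by simp [gasrOut]⟩
  | cons cp items ih =>
    intro ord
    by_cases hguard : cp.2 = cur ∧ cp.1 ∉ ord
    · obtain ⟨n, hscan, hnd, hmem⟩ := ih (ord ++ [cp.1])
      refine ⟨cp.1 :: n, ?_, ?_, ?_⟩
      · have : gasrScanC (cp :: items) cur ord = gasrScanC items cur (ord ++ [cp.1]) := by
          simp [gasrScanC, hguard.1, hguard.2]
        rw [this, hscan]; simp
      · refine List.Nodup.cons ?_ hnd
        intro hcn
        exact (hmem _ hcn).1 (by simp)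
      · intro x hx
        rcases List.mem_cons.mp hx with rfl | hx'
        · exact ⟨hguard.2, by simp⟩
        · exact ⟨fun hxs => (hmem x hx').1 (by simp [hxs]),
            List.mem_cons_of_mem _ (hmem x hx').2⟩
    · obtain ⟨n, hscan, hnd, hmem⟩ := ih ord
      refine ⟨n, ?_, hnd, fun x hx => ⟨(hmem x hx).1, List.mem_cons_of_mem _ (hmem x hx).2⟩⟩
      have : gasrScanC (cp :: items) cur ord = gasrScanC items cur ord := by
        rcases Decidable.not_and_iff_or_not.mp hguard with h | h
        · simp [gasrScanC, h]
        · have hmem' : cp.1 ∈ ord := Decidable.not_not.mp h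
          simp [gasrScanC, hmem']
      rw [this, hscan]

-- while-loop of B: 'while i < len(order): current = order[i]; <scan>; i += 1'
def gasrLoopC (items : List (String × String)) (order : List String) (i : Nat) : List String :=
  if h : i < order.length then
    gasrLoopC items (gasrScanC items order[i] order) (i + 1)
  else order
termination_by 2 * ((items.map Prod.fst).toFinset \ order.toFinset).card + (order.length - i)
decreasing_by
  obtain ⟨n, hscan, hout⟩ := gasrScanC_spec items order[i] order
  have hcard := gasrCard hout
  rw [hscan]
  simp only [List.length_append]
  omega

def get_all_sub_regions_iterative_alt (region : String) (hierarchy : List (String × String)) : List String :=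
  let order := [region]
  let i := 0
  PySem.Set.ofList (gasrLoopC (gasrItems hierarchy) order i)

-- ===== PRECONDITION & SPEC =====
def Spec_get_all_sub_regions_iterative (region : String) (hierarchy : List (String × String)) (out : List String) : Prop := out = get_all_sub_regions_iterative_alt region hierarchy
instance (region : String) (hierarchy : List (String × String)) (out : List String) : Decidable (Spec_get_all_sub_regions_iterative region hierarchy out) := by unfold Spec_get_all_sub_regions_iterative; infer_instance

-- ===== CLAIM (what is proved, stated in full; the proofs are below) =====
def Claim_equal_get_all_sub_regions_iterative : Prop := ∀ (region : String) (hierarchy : List (String × String)), Dom_get_all_sub_regions_iterative region hierarchy → Spec_get_all_sub_regions_iterative region hierarchy (get_all_sub_regions_iterative region hierarchy)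

-- ===== LEMMAS AND PROOFS =====

-- B's scan appends some batch n, and A's inner loop over the children of cur (the pairs of
-- items whose parent is cur, in order) appends the SAME batch to its set and to its queue
theorem gasrScanC_inner (items : List (String × String)) (cur : String) : ∀ ord : List String,
    ∃ n, gasrScanC items cur ord = ord ++ n ∧
      ∀ q, gasrInnerA (ord, q) ((items.filter (fun cp => cp.2 == cur)).map Prod.fst)
        = (ord ++ n, q ++ n) := by
  induction items with
  | nil => exact fun ord => ⟨[], by simp [gasrScanC], by simp [gasrInnerA]⟩
  | cons cp items ih =>
    intro ord
    by_cases hguard : cp.2 = cur ∧ cp.1 ∉ ord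
    · obtain ⟨n, hscan, hinner⟩ := ih (ord ++ [cp.1])
      refine ⟨cp.1 :: n, ?_, ?_⟩
      · have : gasrScanC (cp :: items) cur ord = gasrScanC items cur (ord ++ [cp.1]) := by
          simp [gasrScanC, hguard.1, hguard.2]
        rw [this, hscan]; simp
      · intro q
        have hfilter : ((cp :: items).filter (fun cp => cp.2 == cur)).map Prod.fst
            = cp.1 :: (items.filter (fun cp => cp.2 == cur)).map Prod.fst := by
          simp [hguard.1]
        have hstep : gasrInnerA (ord, q) (cp.1 :: (items.filter (fun cp => cp.2 == cur)).map Prod.fst)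
            = gasrInnerA (ord ++ [cp.1], q ++ [cp.1]) ((items.filter (fun cp => cp.2 == cur)).map Prod.fst) := by
          simp [gasrInnerA, hguard.2]
        rw [hfilter, hstep, hinner]; simp
    · obtain ⟨n, hscan, hinner⟩ := ih ord
      refine ⟨n, ?_, ?_⟩
      · have : gasrScanC (cp :: items) cur ord = gasrScanC items cur ord := by
          rcases Decidable.not_and_iff_or_not.mp hguard with h | h
          · simp [gasrScanC, h]
          · have hmem' : cp.1 ∈ ord := Decidable.not_not.mp h
            simp [gasrScanC, hmem']
        rw [this, hscan]
      · intro q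
        by_cases hp : cp.2 = cur
        · have hmem' : cp.1 ∈ ord := Decidable.not_not.mp ((Decidable.not_and_iff_or_not.mp hguard).resolve_left (fun h => h hp))
          have hfilter : ((cp :: items).filter (fun cp => cp.2 == cur)).map Prod.fst
              = cp.1 :: (items.filter (fun cp => cp.2 == cur)).map Prod.fst := by
            simp [hp]
          have hstep : gasrInnerA (ord, q) (cp.1 :: (items.filter (fun cp => cp.2 == cur)).map Prod.fst)
              = gasrInnerA (ord, q) ((items.filter (fun cp => cp.2 == cur)).map Prod.fst) := by
            simp [gasrInnerA, hmem']
          rw [hfilter, hstep, hinner]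
        · have hfilter : ((cp :: items).filter (fun cp => cp.2 == cur)).map Prod.fst
              = (items.filter (fun cp => cp.2 == cur)).map Prod.fst := by
            simp [hp]
          rw [hfilter, hinner]

-- building children_map: each key r collects the first components of the pairs whose second is r
theorem gasrCM_aux (l : List (String × String)) (r : String) :
    ∀ d : PySem.Dict String (List String),
    (l.foldl (fun d cp => d.modify cp.2 [] (fun y => y ++ [cp.1])) d).getD r []
      = d.getD r [] ++ (l.filter (fun cp => cp.2 == r)).map Prod.fst := by
  induction l with
  | nil => intro d; simp
  | cons cp l ih =>
    intro d
    simp only [List.foldl_cons, ih, List.filter_cons]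
    by_cases h : cp.2 = r
    · simp [h, List.append_assoc]
    · have hb : (cp.2 == r) = false := by simp [h]
      simp only [hb, Bool.false_eq_true, if_false, PySem.Dict.getD_modify]
      rw [if_neg (fun hr => h hr.symm)]

-- children_map.get(r, []) is exactly the children of r in items order
theorem gasrChildrenMap_getD (l : List (String × String)) (r : String) :
    (l.foldl (fun d cp => d.modify cp.2 [] (fun y => y ++ [cp.1]))
        (PySem.Dict.empty : PySem.Dict String (List String))).getD r []
      = (l.filter (fun cp => cp.2 == r)).map Prod.fst := by
  rw [gasrCM_aux]
  simp

theorem gasrLoopA_cons (cm : PySem.Dict String (List String)) (s : List String) (r : String)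
    (rest : List String) :
    gasrLoopA cm s (r :: rest)
      = gasrLoopA cm (gasrInnerA (s, rest) (cm.getD r [])).1
          (gasrInnerA (s, rest) (cm.getD r [])).2 := by
  rw [gasrLoopA.eq_def]

-- A's BFS on (visited-list, queue) equals B's cursor loop: the queue is always the unprocessed
-- suffix of the visited list, i.e. q = order.drop i
theorem gasrLoop_eq (items : List (String × String)) (cm : PySem.Dict String (List String))
    (hcm : ∀ r, cm.getD r [] = (items.filter (fun cp => cp.2 == r)).map Prod.fst) :
    ∀ (order : List String) (i : Nat),
      gasrLoopA cm order (order.drop i) = gasrLoopC items order i := by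
  intro order i
  induction order, i using gasrLoopC.induct items with
  | case1 order i h ih =>
    obtain ⟨n, hscan, hinner⟩ := gasrScanC_inner items order[i] order
    have hdrop : order.drop i = order[i] :: order.drop (i + 1) := List.drop_eq_getElem_cons h
    have hdrop2 : (order ++ n).drop (i + 1) = order.drop (i + 1) ++ n :=
      List.drop_append_of_le_length (by omega)
    rw [hdrop, gasrLoopA_cons, hcm order[i], hinner (order.drop (i + 1))]
    simp only [← hdrop2, ← hscan]
    rw [ih]
    conv_rhs => rw [gasrLoopC.eq_def]
    simp [h]
  | case2 order i h =>
    have hdrop : order.drop i = [] := List.drop_eq_nil_of_le (by omega)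
    rw [hdrop, gasrLoopA.eq_def, gasrLoopC.eq_def]
    simp [h]

-- the cursor loop keeps the list duplicate-free (each scan appends only fresh elements)
theorem gasrLoopC_nodup (items : List (String × String)) :
    ∀ (order : List String) (i : Nat), order.Nodup → (gasrLoopC items order i).Nodup := by
  intro order i
  induction order, i using gasrLoopC.induct items with
  | case1 order i h ih =>
    intro hnd
    obtain ⟨n, hscan, ⟨hnodup, hfresh⟩⟩ := gasrScanC_spec items order[i] order
    rw [gasrLoopC.eq_def]
    simp only [h, dif_pos]
    refine ih ?_
    rw [hscan]
    exact List.Nodup.append hnd hnodup (fun x hx hxn => (hfresh x hxn).1 hx)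
  | case2 order i h =>
    intro hnd
    rw [gasrLoopC.eq_def]
    simp [h, hnd]

-- ===== VERDICT (by name: the statement is the Claim_ definition above) =====
theorem get_all_sub_regions_iterative_spec : Claim_equal_get_all_sub_regions_iterative := by
  intro region hierarchy _
  unfold Spec_get_all_sub_regions_iterative
  simp only [get_all_sub_regions_iterative, get_all_sub_regions_iterative_alt]
  have hnd : (gasrLoopC (gasrItems hierarchy) [region] 0).Nodup :=
    gasrLoopC_nodup _ _ _ (by simp)
  rw [PySem.Set.ofList_eq_self_of_nodup _ hnd]
  have h := gasrLoop_eq (gasrItems hierarchy) _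
    (fun r => gasrChildrenMap_getD (gasrItems hierarchy) r) [region] 0
  simpa [PySem.Set.ofList] using h
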